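-- pv_equiv track=rewrite | github.com/NestorPala/tda-tp3 | ej004_programacion_lineal.py | calc_total_coefficient
-- ===== SOURCE A (Python) =====
-- def calc_total_coefficient(result: dict[int, list[str]], guerreros) -> int:
--     coef = 0
--     group_sums = {}
--
--     for group_number, guerreros_names in result.items():
--         for name in guerreros_names:
--             if group_number not in group_sums:
--                 group_sums[group_number] = 0
--             power_value = guerreros[name]
--             group_sums[group_number] += power_value
--
--     for power_sum in group_sums.values():
--         coef += power_sum ** 2
--
--     return coef
-- ===== SOURCE B (Python) =====
-- def calc_total_coefficient(result: dict[int, list[str]], guerreros) -> int: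
--     # Incremental-square accumulation: no group total is ever squared.
--     # Adding power p to a group whose running total is t raises that group's
--     # square from t*t to (t+p)*(t+p), i.e. by p*p + 2*t*p, so the coefficient
--     # is updated directly as each power is read, with no dict and no second pass.
--     coef = 0
--     for names in result.values():
--         t = 0
--         for name in names:
--             p = guerreros[name]
--             coef += p * p + 2 * t * p
--             t += p
--     return coef
-- ===== Notes on version B (the rewrite author's own statement) =====
-- stated objective: alternative
-- what changed: Replaces A's two-phase 'build a group_sums dict, then square its values' with a single pass that never squares a group total: the coefficient is updated in place by the telescoping identity (t+p)^2 - t^2 = p*p + 2*t*p as each warrior's power is read, keeping only the current group's running total.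
import Mathlib
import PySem

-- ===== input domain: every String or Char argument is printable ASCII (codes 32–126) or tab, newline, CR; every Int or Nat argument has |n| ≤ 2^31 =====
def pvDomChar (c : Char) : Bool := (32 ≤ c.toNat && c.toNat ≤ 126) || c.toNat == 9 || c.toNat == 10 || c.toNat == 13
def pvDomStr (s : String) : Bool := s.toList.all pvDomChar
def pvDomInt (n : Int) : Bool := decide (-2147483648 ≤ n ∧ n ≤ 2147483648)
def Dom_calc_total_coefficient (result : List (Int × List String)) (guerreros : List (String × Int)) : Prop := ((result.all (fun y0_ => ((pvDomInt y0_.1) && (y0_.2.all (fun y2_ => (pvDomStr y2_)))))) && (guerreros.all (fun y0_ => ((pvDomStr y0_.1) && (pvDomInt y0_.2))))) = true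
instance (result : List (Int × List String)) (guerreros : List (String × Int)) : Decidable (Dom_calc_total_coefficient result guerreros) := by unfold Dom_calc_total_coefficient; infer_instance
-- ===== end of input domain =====

-- B replaces A's 'build a group_sums dict, then square its values' by a single pass that
-- never squares a group total: coef is updated by (t+p)^2 - t^2 = p*p + 2*t*p per power
-- read (alternative decomposition, same asymptotic cost).

-- ===== PORT A =====
-- A: first pass builds group_sums[group] += guerreros[name]; second pass sums the squares.
def calc_total_coefficient (result : List (Int × List String)) (guerreros : List (String × Int)) : Int :=
  let group_sums : PySem.Dict Int Int :=
    result.foldl (fun gs p =>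
      p.2.foldl (fun gs name =>
        let gs := if gs.contains p.1 then gs else gs.insert p.1 0
        let power_value := ((PySem.Dict.mk guerreros).get? name).getD 0
        gs.insert p.1 (gs.getD p.1 0 + power_value)) gs)
      PySem.Dict.empty
  group_sums.values.foldl (fun coef power_sum => coef + power_sum ^ 2) 0

-- ===== PORT B =====
-- B: one pass; per group keep running total t, bump coef by p*p + 2*t*p for each power p.
def calc_total_coefficient_alt (result : List (Int × List String)) (guerreros : List (String × Int)) : Int :=
  result.foldl (fun coef p =>
    (p.2.foldl (fun (st : Int × Int) name =>
        let pw := ((PySem.Dict.mk guerreros).get? name).getD 0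
        (st.1 + pw * pw + 2 * st.2 * pw, st.2 + pw)) (coef, 0)).1) 0

-- ===== PRECONDITION & SPEC =====
-- Pre_ excludes (a) inputs where some listed name is missing from guerreros, on which the
-- Python A raises KeyError, and (b) association lists with duplicate group keys, which do
-- not represent any Python dict (Python collapses them before A ever runs).
def Pre_calc_total_coefficient (result : List (Int × List String)) (guerreros : List (String × Int)) : Prop :=
  (result.map Prod.fst).Nodup ∧
  ∀ p ∈ result, ∀ n ∈ p.2, ((PySem.Dict.mk guerreros).get? n).isSome = true
instance (result : List (Int × List String)) (guerreros : List (String × Int)) : Decidable (Pre_calc_total_coefficient result guerreros) := by unfold Pre_calc_total_coefficient; infer_instance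

def pvWitness_calc_total_coefficient : (List (Int × List String)) × (List (String × Int)) :=
  ([(1, ["ana", "bob"]), (2, ["bob"]), (3, [])], [("ana", 3), ("bob", -2)])

def Spec_calc_total_coefficient (result : List (Int × List String)) (guerreros : List (String × Int)) (out : Int) : Prop := out = calc_total_coefficient_alt result guerreros
instance (result : List (Int × List String)) (guerreros : List (String × Int)) (out : Int) : Decidable (Spec_calc_total_coefficient result guerreros out) := by unfold Spec_calc_total_coefficient; infer_instance

-- ===== CLAIM (what is proved, stated in full; the proofs are below) =====
def Claim_equal_calc_total_coefficient : Prop := ∀ (result : List (Int × List String)) (guerreros : List (String × Int)), Dom_calc_total_coefficient result guerreros → Pre_calc_total_coefficient result guerreros → Spec_calc_total_coefficient result guerreros (calc_total_coefficient result guerreros)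

-- ===== LEMMAS AND PROOFS =====

-- power of name n, shared shorthand for the proofs
def pvPow (guerreros : List (String × Int)) (n : String) : Int :=
  ((PySem.Dict.mk guerreros).get? n).getD 0

-- inner loop of A once the key g is already present (as d.insert g v, g fresh in d)
theorem pv_inner_from (guerreros : List (String × Int)) (g : Int)
    (names : List String) (d : PySem.Dict Int Int) (v : Int)
    (_hnc : d.contains g = false) :
    names.foldl (fun gs name =>
        let gs := if gs.contains g then gs else gs.insert g 0
        gs.insert g (gs.getD g 0 + pvPow guerreros name)) (d.insert g v)
    = d.insert g (names.foldl (fun s n => s + pvPow guerreros n) v) := by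
  induction names generalizing v with
  | nil => rfl
  | cons n ns ih =>
      simp only [List.foldl_cons, PySem.Dict.contains_insert_self, if_pos,
        PySem.Dict.getD_insert_self, PySem.Dict.insert_insert_self]
      exact ih (v + pvPow guerreros n)

-- inner loop of A from a dict not containing g: either no-op (empty names) or one appended item
theorem pv_inner (guerreros : List (String × Int)) (g : Int)
    (names : List String) (gs : PySem.Dict Int Int)
    (hnc : gs.contains g = false) :
    (names.foldl (fun gs name =>
        let gs := if gs.contains g then gs else gs.insert g 0
        gs.insert g (gs.getD g 0 + pvPow guerreros name)) gs).items
    = if names.isEmpty then gs.items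
      else gs.items ++ [(g, names.foldl (fun s n => s + pvPow guerreros n) 0)] := by
  cases names with
  | nil => rfl
  | cons n ns =>
      simp only [List.foldl_cons, hnc, if_neg, Bool.false_eq_true, not_false_iff,
        PySem.Dict.getD_insert_self, PySem.Dict.insert_insert_self, List.isEmpty_cons]
      rw [pv_inner_from guerreros g ns gs (0 + pvPow guerreros n) hnc,
        PySem.Dict.items_insert_of_not_contains _ _ hnc]

-- outer loop of A over groups with pairwise-distinct keys, all fresh in gs
theorem pv_outer (guerreros : List (String × Int))
    (result : List (Int × List String)) (gs : PySem.Dict Int Int)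
    (hnd : (result.map Prod.fst).Nodup)
    (hfresh : ∀ p ∈ result, gs.contains p.1 = false) :
    (result.foldl (fun gs p =>
        p.2.foldl (fun gs name =>
          let gs := if gs.contains p.1 then gs else gs.insert p.1 0
          gs.insert p.1 (gs.getD p.1 0 + pvPow guerreros name)) gs) gs).items
    = gs.items ++ (result.filter (fun p => !p.2.isEmpty)).map
        (fun p => (p.1, p.2.foldl (fun s n => s + pvPow guerreros n) 0)) := by
  induction result generalizing gs with
  | nil => simp only [List.foldl_nil, List.filter_nil, List.map_nil, List.append_nil]
  | cons p ps ih =>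
      simp only [List.map_cons, List.nodup_cons] at hnd
      have hp : gs.contains p.1 = false := hfresh p (by simp)
      simp only [List.foldl_cons]
      cases hns : p.2.isEmpty with
      | true =>
          have h2 : p.2 = [] := List.isEmpty_iff.mp hns
          rw [h2]
          simp only [List.foldl_nil, List.filter_cons, h2]
          rw [ih gs hnd.2 (fun q hq => hfresh q (by simp [hq]))]
          simp
      | false =>
          have hitems := pv_inner guerreros p.1 p.2 gs hp
          rw [hns] at hitems
          simp only [Bool.false_eq_true, if_false] at hitems
          set gs' := p.2.foldl (fun gs name =>
            let gs := if gs.contains p.1 then gs else gs.insert p.1 0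
            gs.insert p.1 (gs.getD p.1 0 + pvPow guerreros name)) gs with hgs'
          have hkeys' : ∀ q ∈ ps, gs'.contains q.1 = false := by
            intro q hq
            have hcontains : gs'.contains q.1 = decide (q.1 ∈ gs'.keys) :=
              PySem.Dict.contains_eq_decide_mem_keys gs' q.1
            have hk : gs'.keys = gs.keys ++ [p.1] := by
              have : gs'.keys = gs'.items.map Prod.fst := rfl
              rw [this, hitems]
              simp [PySem.Dict.keys]
            rw [hcontains, hk]
            have hq1 : gs.contains q.1 = false := hfresh q (by simp [hq])
            have hqmem : q.1 ∉ gs.keys := by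
              intro hmem
              have hc := (PySem.Dict.contains_iff_mem_keys (d := gs) (k := q.1)).mpr hmem
              rw [hq1] at hc
              exact Bool.false_ne_true hc
            have hqp : q.1 ≠ p.1 := by
              intro h
              exact hnd.1 (by simpa [h] using List.mem_map_of_mem (f := Prod.fst) hq)
            simp [hqmem, hqp]
          rw [ih gs' hnd.2 hkeys', hitems]
          simp [hns]

-- coef loop of A: foldl of (· + ·^2) equals the sum of squares
theorem pv_foldl_sq (l : List Int) (c : Int) :
    l.foldl (fun coef s => coef + s ^ 2) c = c + (l.map (fun s => s ^ 2)).sum := by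
  induction l generalizing c with
  | nil => simp
  | cons x xs ih => simp [ih, add_assoc]

-- dropping empty groups does not change the sum of squares (their square is 0)
theorem pv_filter_sum (guerreros : List (String × Int)) (result : List (Int × List String)) :
    ((result.filter (fun p => !p.2.isEmpty)).map
        (fun p => (p.2.foldl (fun s n => s + pvPow guerreros n) 0) ^ 2)).sum
    = (result.map (fun p => (p.2.foldl (fun s n => s + pvPow guerreros n) 0) ^ 2)).sum := by
  induction result with
  | nil => rfl
  | cons p ps ih =>
      cases hns : p.2.isEmpty with
      | true =>
          have h2 : p.2 = [] := List.isEmpty_iff.mp hns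
          simp [h2, ih]
      | false => simp [hns, ih]

-- B's inner loop: the telescoped updates reconstruct c - t^2 + (final total)^2
theorem pv_inner_b (pow : String → Int) (names : List String) (c t : Int) :
    names.foldl (fun (st : Int × Int) name =>
        let pw := pow name
        (st.1 + pw * pw + 2 * st.2 * pw, st.2 + pw)) (c, t)
    = (c - t ^ 2 + (names.foldl (fun s n => s + pow n) t) ^ 2,
       names.foldl (fun s n => s + pow n) t) := by
  induction names generalizing c t with
  | nil => simp
  | cons n ns ih =>
      simp only [List.foldl_cons]
      rw [ih]
      have : c + pow n * pow n + 2 * t * pow n - (t + pow n) ^ 2 = c - t ^ 2 := by ring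
      rw [this]

-- B's outer loop accumulates exactly the sum of squared group totals
theorem pv_outer_b (pow : String → Int) (result : List (Int × List String)) (c : Int) :
    result.foldl (fun coef p =>
        (p.2.foldl (fun (st : Int × Int) name =>
            let pw := pow name
            (st.1 + pw * pw + 2 * st.2 * pw, st.2 + pw)) (coef, 0)).1) c
    = c + (result.map (fun p => (p.2.foldl (fun s n => s + pow n) 0) ^ 2)).sum := by
  induction result generalizing c with
  | nil => simp
  | cons p ps ih =>
      simp only [List.foldl_cons, List.map_cons, List.sum_cons]
      rw [pv_inner_b, ih]
      ring_nf

-- ===== VERDICT (by name: the statement is the Claim_ definition above) =====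
theorem calc_total_coefficient_spec : Claim_equal_calc_total_coefficient := by
  intro result guerreros _hdom hpre
  unfold Spec_calc_total_coefficient
  show (List.foldl (fun coef power_sum => coef + power_sum ^ 2) 0
      (result.foldl (fun gs p =>
        p.2.foldl (fun gs name =>
          let gs := if gs.contains p.1 then gs else gs.insert p.1 0
          gs.insert p.1 (gs.getD p.1 0 + pvPow guerreros name)) gs)
        PySem.Dict.empty).values)
    = result.foldl (fun coef p =>
        (p.2.foldl (fun (st : Int × Int) name =>
            let pw := pvPow guerreros name
            (st.1 + pw * pw + 2 * st.2 * pw, st.2 + pw)) (coef, 0)).1) 0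
  have houter := pv_outer guerreros result PySem.Dict.empty hpre.1
    (fun p _ => PySem.Dict.contains_empty p.1)
  have hval : (result.foldl (fun gs p =>
      p.2.foldl (fun gs name =>
        let gs := if gs.contains p.1 then gs else gs.insert p.1 0
        gs.insert p.1 (gs.getD p.1 0 + pvPow guerreros name)) gs)
      PySem.Dict.empty).values
      = ((result.filter (fun p => !p.2.isEmpty)).map
          (fun p => p.2.foldl (fun s n => s + pvPow guerreros n) 0)) := by
    have hv : ∀ d : PySem.Dict Int Int, d.values = d.items.map Prod.snd := fun _ => rfl
    rw [hv, houter]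
    simp [PySem.Dict.empty, Function.comp]
  rw [hval, pv_foldl_sq, pv_outer_b (pvPow guerreros), ← pv_filter_sum guerreros result]
  simp only [zero_add, List.map_map]
  rfl
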